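-- pv_equiv track=rewrite | github.com/addleonel/python-fundamentals | Exercises/project_euler_solutions/pe_3.py | split_number
-- ===== SOURCE A (Python) =====
-- def split_number(number):
--     n = number
--     digits = []
--     while n >0:
--         r = n%10
--         n = n//10
--         digits.append(r)
--     digits.sort()
--     return digits
-- ===== SOURCE B (Python) =====
-- def split_number(number):
--     n = number
--     counts = [0] * 10
--     while n > 0:
--         counts[n % 10] += 1
--         n = n // 10
--     result = []
--     for d in range(10):
--         result.extend([d] * counts[d])
--     return result
-- ===== Notes on version B (the rewrite author's own statement) =====
-- stated objective: alternative
-- what changed: Replaces the comparison sort of the extracted digit list with a counting sort: the digit-peeling loop increments a ten-bucket count table and the sorted result is rebuilt by emitting each digit value in ascending order, count-many times.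
import Mathlib
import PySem

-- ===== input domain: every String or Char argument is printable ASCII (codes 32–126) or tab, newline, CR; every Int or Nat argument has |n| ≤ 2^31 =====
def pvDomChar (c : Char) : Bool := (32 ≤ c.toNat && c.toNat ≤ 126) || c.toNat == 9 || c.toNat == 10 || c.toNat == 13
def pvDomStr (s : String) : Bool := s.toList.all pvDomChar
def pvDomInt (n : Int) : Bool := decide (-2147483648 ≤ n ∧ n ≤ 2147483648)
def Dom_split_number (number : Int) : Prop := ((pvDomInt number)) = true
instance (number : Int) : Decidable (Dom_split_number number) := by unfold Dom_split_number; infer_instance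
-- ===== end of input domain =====

-- B replaces A's comparison sort of the extracted digit list with a counting sort over the 0..9 buckets (alternative algorithm).

-- termination helper for the digit-peeling loops
theorem pv_div10_lt (n : Int) (h : 0 < n) : (PySem.Int.floordiv n 10).toNat < n.toNat := by
  have key := PySem.Int.floordiv_mul_add_mod n 10
  have h0 := PySem.Int.mod_nonneg n (show (0:Int) < 10 by norm_num)
  have h1 := PySem.Int.mod_lt n (show (0:Int) < 10 by norm_num)
  omega

-- ===== PORT A =====
-- A's while loop: peel n % 10, append to digits
def splitLoop (n : Int) (digits : List Int) : List Int :=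
  if 0 < n then
    splitLoop (PySem.Int.floordiv n 10) (digits ++ [PySem.Int.mod n 10])
  else digits
  termination_by n.toNat
  decreasing_by exact pv_div10_lt n (by assumption)

def split_number (number : Int) : List Int :=
  PySem.List.sorted (splitLoop number []) (fun x => x) false

-- ===== PORT B =====
-- B's while loop: counts[n % 10] += 1
def countLoop (n : Int) (counts : List Int) : List Int :=
  if 0 < n then
    countLoop (PySem.Int.floordiv n 10)
      (counts.set (PySem.Int.mod n 10).toNat (counts.getD (PySem.Int.mod n 10).toNat 0 + 1))
  else counts
  termination_by n.toNat
  decreasing_by exact pv_div10_lt n (by assumption)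

def split_number_alt (number : Int) : List Int :=
  let counts := countLoop number (List.replicate 10 0)
  (PySem.List.pyRange 0 10 1).foldl
    (fun result d => result ++ List.replicate (counts.getD d.toNat 0).toNat d) []

-- ===== PRECONDITION & SPEC =====
def Spec_split_number (number : Int) (out : List Int) : Prop := out = split_number_alt number
instance (number : Int) (out : List Int) : Decidable (Spec_split_number number out) := by unfold Spec_split_number; infer_instance

-- ===== CLAIM (what is proved, stated in full; the proofs are below) =====
def Claim_equal_split_number : Prop := ∀ (number : Int), Dom_split_number number → Spec_split_number number (split_number number)

-- ===== LEMMAS AND PROOFS =====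

theorem splitLoop_pos (n : Int) (acc : List Int) (h : 0 < n) :
    splitLoop n acc = splitLoop (PySem.Int.floordiv n 10) (acc ++ [PySem.Int.mod n 10]) := by
  conv_lhs => rw [splitLoop]
  rw [if_pos h]

theorem splitLoop_neg (n : Int) (acc : List Int) (h : ¬ 0 < n) :
    splitLoop n acc = acc := by
  conv_lhs => rw [splitLoop]
  rw [if_neg h]

theorem countLoop_pos (n : Int) (c : List Int) (h : 0 < n) :
    countLoop n c = countLoop (PySem.Int.floordiv n 10)
      (c.set (PySem.Int.mod n 10).toNat (c.getD (PySem.Int.mod n 10).toNat 0 + 1)) := by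
  conv_lhs => rw [countLoop]
  rw [if_pos h]

theorem countLoop_neg (n : Int) (c : List Int) (h : ¬ 0 < n) :
    countLoop n c = c := by
  conv_lhs => rw [countLoop]
  rw [if_neg h]

theorem splitLoop_acc (n : Int) (acc : List Int) :
    splitLoop n acc = acc ++ splitLoop n [] := by
  by_cases h : 0 < n
  · rw [splitLoop_pos n acc h, splitLoop_pos n [] h,
      splitLoop_acc (PySem.Int.floordiv n 10) (acc ++ [PySem.Int.mod n 10]),
      splitLoop_acc (PySem.Int.floordiv n 10) ([] ++ [PySem.Int.mod n 10])]
    simp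
  · rw [splitLoop_neg n acc h, splitLoop_neg n [] h]
    simp
  termination_by n.toNat
  decreasing_by all_goals exact pv_div10_lt n h

theorem digits_range (n : Int) : ∀ x ∈ splitLoop n [], 0 ≤ x ∧ x < 10 := by
  by_cases h : 0 < n
  · rw [splitLoop_pos n [] h, splitLoop_acc]
    intro x hx
    simp only [List.nil_append, List.mem_append, List.mem_singleton] at hx
    rcases hx with hx | hx
    · subst hx
      exact ⟨PySem.Int.mod_nonneg _ (show (0:Int) < 10 by norm_num),
             PySem.Int.mod_lt _ (show (0:Int) < 10 by norm_num)⟩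
    · exact digits_range (PySem.Int.floordiv n 10) x hx
  · rw [splitLoop_neg n [] h]; simp
  termination_by n.toNat
  decreasing_by exact pv_div10_lt n h

theorem countLoop_foldl (n : Int) (c : List Int) :
    countLoop n c = (splitLoop n []).foldl
      (fun c x => c.set x.toNat (c.getD x.toNat 0 + 1)) c := by
  by_cases h : 0 < n
  · rw [countLoop_pos n c h,
      countLoop_foldl (PySem.Int.floordiv n 10)
        (c.set (PySem.Int.mod n 10).toNat (c.getD (PySem.Int.mod n 10).toNat 0 + 1)),
      splitLoop_pos n [] h,
      splitLoop_acc (PySem.Int.floordiv n 10) ([] ++ [PySem.Int.mod n 10])]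
    simp
  · rw [countLoop_neg n c h, splitLoop_neg n [] h]
    simp
  termination_by n.toNat
  decreasing_by exact pv_div10_lt n h

theorem bump_getD (c : List Int) (i j : Nat) (hj : j < c.length) :
    (c.set i (c.getD i 0 + 1)).getD j 0 = c.getD j 0 + (if i = j then 1 else 0) := by
  by_cases h : i = j
  · subst h
    rw [if_pos rfl, List.getD_eq_getElem?_getD, List.getElem?_set_self',
      List.getElem?_eq_getElem hj]
    simp [List.getD_eq_getElem?_getD, List.getElem?_eq_getElem hj]
  · simp [List.getD_eq_getElem?_getD, List.getElem?_set_ne h, h]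

theorem foldl_bump_getD (ds : List Int) (c : List Int) (hc : c.length = 10)
    (hds : ∀ x ∈ ds, 0 ≤ x ∧ x < 10) (j : Nat) (hj : j < 10) :
    (ds.foldl (fun c x => c.set x.toNat (c.getD x.toNat 0 + 1)) c).getD j 0
      = c.getD j 0 + ds.count (j : Int) := by
  induction ds generalizing c with
  | nil => simp
  | cons x ds ih =>
    have hx := hds x (by simp)
    have hlen : (c.set x.toNat (c.getD x.toNat 0 + 1)).length = 10 := by simp [hc]
    rw [List.foldl_cons, ih _ hlen (fun y hy => hds y (by simp [hy]))]
    rw [bump_getD c x.toNat j (by omega)]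
    have hcount : (x :: ds).count (j : Int) = ds.count (j : Int) + (if x = (j : Int) then 1 else 0) := by
      by_cases h : x = (j : Int)
      · simp [List.count_cons, h]
      · simp [List.count_cons, h, Ne.symm h]
    rw [hcount]
    have hiff : x.toNat = j ↔ x = (j : Int) := by omega
    by_cases h : x = (j : Int)
    · rw [if_pos (hiff.2 h), if_pos h]
      push_cast
      ring
    · rw [if_neg (fun hh => h (hiff.1 hh)), if_neg h]
      push_cast
      ring

-- counts.getD j 0 after the count loop is the multiplicity of digit j
theorem counts_spec (n : Int) (j : Nat) (hj : j < 10) :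
    (countLoop n (List.replicate 10 0)).getD j 0 = ((splitLoop n []).count (j : Int) : Int) := by
  rw [countLoop_foldl, foldl_bump_getD _ _ (by simp) (digits_range n) j hj]
  have hz : (List.replicate 10 (0:Int)).getD j 0 = 0 := by
    interval_cases j <;> rfl
  rw [hz, zero_add]

theorem alt_eq_flat (n : Int) :
    split_number_alt n =
      (PySem.List.pyRange 0 10 1).flatMap
        (fun d => List.replicate ((countLoop n (List.replicate 10 0)).getD d.toNat 0).toNat d) := by
  unfold split_number_alt
  rw [PySem.List.foldl_append_eq_flatMap]
  simp

theorem pyRange_ten : PySem.List.pyRange 0 10 1 = [0,1,2,3,4,5,6,7,8,9] := by decide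

set_option maxHeartbeats 1000000 in
theorem alt_eq_concat (n : Int) :
    split_number_alt n = (List.replicate ((countLoop n (List.replicate 10 0)).getD 0 0).toNat (0 : Int) ++ (List.replicate ((countLoop n (List.replicate 10 0)).getD 1 0).toNat (1 : Int) ++ (List.replicate ((countLoop n (List.replicate 10 0)).getD 2 0).toNat (2 : Int) ++ (List.replicate ((countLoop n (List.replicate 10 0)).getD 3 0).toNat (3 : Int) ++ (List.replicate ((countLoop n (List.replicate 10 0)).getD 4 0).toNat (4 : Int) ++ (List.replicate ((countLoop n (List.replicate 10 0)).getD 5 0).toNat (5 : Int) ++ (List.replicate ((countLoop n (List.replicate 10 0)).getD 6 0).toNat (6 : Int) ++ (List.replicate ((countLoop n (List.replicate 10 0)).getD 7 0).toNat (7 : Int) ++ (List.replicate ((countLoop n (List.replicate 10 0)).getD 8 0).toNat (8 : Int) ++ (List.replicate ((countLoop n (List.replicate 10 0)).getD 9 0).toNat (9 : Int) ++ [])))))))))) := by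
  rw [alt_eq_flat, pyRange_ten]
  rfl

set_option maxHeartbeats 1000000 in
theorem alt_perm (n : Int) : (split_number_alt n).Perm (splitLoop n []) := by
  rw [List.perm_iff_count]
  intro a
  rw [alt_eq_concat]
  have hcnt : ∀ j : Nat, j < 10 →
      ((countLoop n (List.replicate 10 0)).getD j 0).toNat = (splitLoop n []).count (j : Int) := by
    intro j hj
    rw [counts_spec n j hj]
    exact Int.toNat_natCast _
  have h0 := hcnt 0 (by norm_num); have h1 := hcnt 1 (by norm_num)
  have h2 := hcnt 2 (by norm_num); have h3 := hcnt 3 (by norm_num)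
  have h4 := hcnt 4 (by norm_num); have h5 := hcnt 5 (by norm_num)
  have h6 := hcnt 6 (by norm_num); have h7 := hcnt 7 (by norm_num)
  have h8 := hcnt 8 (by norm_num); have h9 := hcnt 9 (by norm_num)
  simp only [List.count_append, List.count_replicate, List.count_nil, beq_iff_eq]
  generalize hg0 : ((countLoop n (List.replicate 10 0)).getD 0 0).toNat = c0 at h0 ⊢
  generalize hg1 : ((countLoop n (List.replicate 10 0)).getD 1 0).toNat = c1 at h1 ⊢
  generalize hg2 : ((countLoop n (List.replicate 10 0)).getD 2 0).toNat = c2 at h2 ⊢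
  generalize hg3 : ((countLoop n (List.replicate 10 0)).getD 3 0).toNat = c3 at h3 ⊢
  generalize hg4 : ((countLoop n (List.replicate 10 0)).getD 4 0).toNat = c4 at h4 ⊢
  generalize hg5 : ((countLoop n (List.replicate 10 0)).getD 5 0).toNat = c5 at h5 ⊢
  generalize hg6 : ((countLoop n (List.replicate 10 0)).getD 6 0).toNat = c6 at h6 ⊢
  generalize hg7 : ((countLoop n (List.replicate 10 0)).getD 7 0).toNat = c7 at h7 ⊢
  generalize hg8 : ((countLoop n (List.replicate 10 0)).getD 8 0).toNat = c8 at h8 ⊢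
  generalize hg9 : ((countLoop n (List.replicate 10 0)).getD 9 0).toNat = c9 at h9 ⊢
  by_cases ha : 0 ≤ a ∧ a < 10
  · obtain ⟨hal, har⟩ := ha
    interval_cases a <;> norm_num <;> omega
  · have hnotmem : a ∉ splitLoop n [] := fun hmem =>
      ha ⟨(digits_range n a hmem).1, (digits_range n a hmem).2⟩
    rw [List.count_eq_zero_of_not_mem hnotmem]
    have ha' : a < 0 ∨ 10 ≤ a := by
      by_contra hc
      push_neg at hc
      exact ha ⟨hc.1, hc.2⟩
    have t0 : ¬((0:Int) = a) := by omega
    have t1 : ¬((1:Int) = a) := by omega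
    have t2 : ¬((2:Int) = a) := by omega
    have t3 : ¬((3:Int) = a) := by omega
    have t4 : ¬((4:Int) = a) := by omega
    have t5 : ¬((5:Int) = a) := by omega
    have t6 : ¬((6:Int) = a) := by omega
    have t7 : ¬((7:Int) = a) := by omega
    have t8 : ¬((8:Int) = a) := by omega
    have t9 : ¬((9:Int) = a) := by omega
    rw [if_neg t0, if_neg t1, if_neg t2, if_neg t3, if_neg t4, if_neg t5, if_neg t6, if_neg t7, if_neg t8, if_neg t9]

theorem repl_step (k : Int) (m : Nat) (l : List Int) (hl : l.Pairwise (· ≤ ·))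
    (hbd : ∀ y ∈ l, k ≤ y) :
    (List.replicate m k ++ l).Pairwise (· ≤ ·) ∧ ∀ y ∈ List.replicate m k ++ l, k ≤ y := by
  constructor
  · rw [List.pairwise_append]
    refine ⟨?_, hl, ?_⟩
    · simp [List.pairwise_replicate]
    · intro x hx y hy
      rw [List.eq_of_mem_replicate hx]
      exact hbd y hy
  · intro y hy
    rcases List.mem_append.1 hy with hy | hy
    · rw [List.eq_of_mem_replicate hy]
    · exact hbd y hy

theorem alt_pairwise (n : Int) : (split_number_alt n).Pairwise (· ≤ ·) := by
  rw [alt_eq_concat]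
  have s9 := repl_step 9 ((countLoop n (List.replicate 10 0)).getD 9 0).toNat [] List.Pairwise.nil (by simp)
  have s8 := repl_step 8 ((countLoop n (List.replicate 10 0)).getD 8 0).toNat (List.replicate ((countLoop n (List.replicate 10 0)).getD 9 0).toNat (9 : Int) ++ []) s9.1 (fun y hy => le_trans (by norm_num) (s9.2 y hy))
  have s7 := repl_step 7 ((countLoop n (List.replicate 10 0)).getD 7 0).toNat (List.replicate ((countLoop n (List.replicate 10 0)).getD 8 0).toNat (8 : Int) ++ (List.replicate ((countLoop n (List.replicate 10 0)).getD 9 0).toNat (9 : Int) ++ [])) s8.1 (fun y hy => le_trans (by norm_num) (s8.2 y hy))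
  have s6 := repl_step 6 ((countLoop n (List.replicate 10 0)).getD 6 0).toNat (List.replicate ((countLoop n (List.replicate 10 0)).getD 7 0).toNat (7 : Int) ++ (List.replicate ((countLoop n (List.replicate 10 0)).getD 8 0).toNat (8 : Int) ++ (List.replicate ((countLoop n (List.replicate 10 0)).getD 9 0).toNat (9 : Int) ++ []))) s7.1 (fun y hy => le_trans (by norm_num) (s7.2 y hy))
  have s5 := repl_step 5 ((countLoop n (List.replicate 10 0)).getD 5 0).toNat (List.replicate ((countLoop n (List.replicate 10 0)).getD 6 0).toNat (6 : Int) ++ (List.replicate ((countLoop n (List.replicate 10 0)).getD 7 0).toNat (7 : Int) ++ (List.replicate ((countLoop n (List.replicate 10 0)).getD 8 0).toNat (8 : Int) ++ (List.replicate ((countLoop n (List.replicate 10 0)).getD 9 0).toNat (9 : Int) ++ [])))) s6.1 (fun y hy => le_trans (by norm_num) (s6.2 y hy))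
  have s4 := repl_step 4 ((countLoop n (List.replicate 10 0)).getD 4 0).toNat (List.replicate ((countLoop n (List.replicate 10 0)).getD 5 0).toNat (5 : Int) ++ (List.replicate ((countLoop n (List.replicate 10 0)).getD 6 0).toNat (6 : Int) ++ (List.replicate ((countLoop n (List.replicate 10 0)).getD 7 0).toNat (7 : Int) ++ (List.replicate ((countLoop n (List.replicate 10 0)).getD 8 0).toNat (8 : Int) ++ (List.replicate ((countLoop n (List.replicate 10 0)).getD 9 0).toNat (9 : Int) ++ []))))) s5.1 (fun y hy => le_trans (by norm_num) (s5.2 y hy))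
  have s3 := repl_step 3 ((countLoop n (List.replicate 10 0)).getD 3 0).toNat (List.replicate ((countLoop n (List.replicate 10 0)).getD 4 0).toNat (4 : Int) ++ (List.replicate ((countLoop n (List.replicate 10 0)).getD 5 0).toNat (5 : Int) ++ (List.replicate ((countLoop n (List.replicate 10 0)).getD 6 0).toNat (6 : Int) ++ (List.replicate ((countLoop n (List.replicate 10 0)).getD 7 0).toNat (7 : Int) ++ (List.replicate ((countLoop n (List.replicate 10 0)).getD 8 0).toNat (8 : Int) ++ (List.replicate ((countLoop n (List.replicate 10 0)).getD 9 0).toNat (9 : Int) ++ [])))))) s4.1 (fun y hy => le_trans (by norm_num) (s4.2 y hy))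
  have s2 := repl_step 2 ((countLoop n (List.replicate 10 0)).getD 2 0).toNat (List.replicate ((countLoop n (List.replicate 10 0)).getD 3 0).toNat (3 : Int) ++ (List.replicate ((countLoop n (List.replicate 10 0)).getD 4 0).toNat (4 : Int) ++ (List.replicate ((countLoop n (List.replicate 10 0)).getD 5 0).toNat (5 : Int) ++ (List.replicate ((countLoop n (List.replicate 10 0)).getD 6 0).toNat (6 : Int) ++ (List.replicate ((countLoop n (List.replicate 10 0)).getD 7 0).toNat (7 : Int) ++ (List.replicate ((countLoop n (List.replicate 10 0)).getD 8 0).toNat (8 : Int) ++ (List.replicate ((countLoop n (List.replicate 10 0)).getD 9 0).toNat (9 : Int) ++ []))))))) s3.1 (fun y hy => le_trans (by norm_num) (s3.2 y hy))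
  have s1 := repl_step 1 ((countLoop n (List.replicate 10 0)).getD 1 0).toNat (List.replicate ((countLoop n (List.replicate 10 0)).getD 2 0).toNat (2 : Int) ++ (List.replicate ((countLoop n (List.replicate 10 0)).getD 3 0).toNat (3 : Int) ++ (List.replicate ((countLoop n (List.replicate 10 0)).getD 4 0).toNat (4 : Int) ++ (List.replicate ((countLoop n (List.replicate 10 0)).getD 5 0).toNat (5 : Int) ++ (List.replicate ((countLoop n (List.replicate 10 0)).getD 6 0).toNat (6 : Int) ++ (List.replicate ((countLoop n (List.replicate 10 0)).getD 7 0).toNat (7 : Int) ++ (List.replicate ((countLoop n (List.replicate 10 0)).getD 8 0).toNat (8 : Int) ++ (List.replicate ((countLoop n (List.replicate 10 0)).getD 9 0).toNat (9 : Int) ++ [])))))))) s2.1 (fun y hy => le_trans (by norm_num) (s2.2 y hy))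
  have s0 := repl_step 0 ((countLoop n (List.replicate 10 0)).getD 0 0).toNat (List.replicate ((countLoop n (List.replicate 10 0)).getD 1 0).toNat (1 : Int) ++ (List.replicate ((countLoop n (List.replicate 10 0)).getD 2 0).toNat (2 : Int) ++ (List.replicate ((countLoop n (List.replicate 10 0)).getD 3 0).toNat (3 : Int) ++ (List.replicate ((countLoop n (List.replicate 10 0)).getD 4 0).toNat (4 : Int) ++ (List.replicate ((countLoop n (List.replicate 10 0)).getD 5 0).toNat (5 : Int) ++ (List.replicate ((countLoop n (List.replicate 10 0)).getD 6 0).toNat (6 : Int) ++ (List.replicate ((countLoop n (List.replicate 10 0)).getD 7 0).toNat (7 : Int) ++ (List.replicate ((countLoop n (List.replicate 10 0)).getD 8 0).toNat (8 : Int) ++ (List.replicate ((countLoop n (List.replicate 10 0)).getD 9 0).toNat (9 : Int) ++ []))))))))) s1.1 (fun y hy => le_trans (by norm_num) (s1.2 y hy))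
  exact s0.1

-- ===== VERDICT (by name: the statement is the Claim_ definition above) =====
theorem split_number_spec : Claim_equal_split_number := by
  intro number _
  unfold Spec_split_number split_number
  exact PySem.List.sorted_id_eq_of_perm_of_pairwise _ _ (alt_perm number) (alt_pairwise number)
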